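-- pv_equiv track=rewrite | github.com/pfehlinger/risk_adjustment_model | src/v24.py | get_disease_interactions_v24
-- ===== SOURCE A (Python) =====
-- def get_disease_interactions_v24(categories: list) -> list:
--     cancer = False
--     cancer_list = ['HCC8', 'HCC9', 'HCC10', 'HCC11', 'HCC12']
--     diabetes = False
--     diabetes_list = ['HCC17', 'HCC18', 'HCC19']
--     card_resp_fail = False
--     card_resp_fail_list = ['HCC82', 'HCC83', 'HCC84']
--     chf = False
--     chf_list = ['HCC85']
--     g_copd_cf = False
--     g_copd_cf_list = ['HCC110', 'HCC111', 'HCC112']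
--     renal_v24 = False
--     renal_v24_list = ['HCC134', 'HCC135', 'HCC136', 'HCC137', 'HCC138']
--     sepsis = False
--     sepsis_list = ['HCC2']
--     g_substance_use_disorder_v24 = False
--     g_substance_use_disorder_v24_list = ['HCC54', 'HCC55', 'HCC56']
--     g_pyshiatric_v24 = False
--     g_pyshiatric_v24_list = ['HCC57', 'HCC58', 'HCC59', 'HCC60']
--
--     for category in cancer_list:
--         if category in categories:
--             cancer = True
--             break
--     for category in diabetes_list:
--         if category in categories:
--             diabetes = True
--             break
--     for category in card_resp_fail_list:
--         if category in categories:
--             card_resp_fail = True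
--             break
--     for category in chf_list:
--         if category in categories:
--             chf = True
--             break
--     for category in g_copd_cf_list:
--         if category in categories:
--             g_copd_cf = True
--             break
--     for category in renal_v24_list:
--         if category in categories:
--             renal_v24 = True
--             break
--     for category in sepsis_list:
--         if category in categories:
--             sepsis = True
--             break
--     for category in g_substance_use_disorder_v24_list:
--         if category in categories:
--             g_substance_use_disorder_v24 = True
--             break
--     for category in g_pyshiatric_v24_list:
--         if category in categories:
--             g_pyshiatric_v24 = True
--             break
--     if 'HCC47' in categories:
--         hcc47 = True
--     else:
--         hcc47 = False
--     if 'HCC85' in categories: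
--         hcc85 = True
--     else:
--         hcc85 = False
--     if 'HCC96' in categories:
--         hcc96 = True
--     else:
--         hcc96 = False
--
--     interactions = {
--         'HCC47_gCancer': bool(cancer*hcc47),
--         'DIABETES_CHF': bool(diabetes*chf),
--         'CHF_gCopdCF': bool(chf*g_copd_cf),
--         'HCC85_gRenal_V24': bool(hcc85*renal_v24),
--         'gCopdCF_CARD_RESP_FAIL': bool(g_copd_cf*card_resp_fail),
--         'HCC85_HCC96': bool(hcc85*hcc96),
--         'gSubstanceUseDisorder_gPsych': bool(g_pyshiatric_v24*g_substance_use_disorder_v24)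
--     }
--     interaction_list = [key for key, value in interactions.items() if value]
--
--     return interaction_list
-- ===== SOURCE B (Python) =====
-- def get_disease_interactions_v24(categories: list) -> list:
--     present = set(categories)
--     groups = {
--         'cancer': {'HCC8', 'HCC9', 'HCC10', 'HCC11', 'HCC12'},
--         'diabetes': {'HCC17', 'HCC18', 'HCC19'},
--         'card_resp_fail': {'HCC82', 'HCC83', 'HCC84'},
--         'chf': {'HCC85'},
--         'g_copd_cf': {'HCC110', 'HCC111', 'HCC112'},
--         'renal_v24': {'HCC134', 'HCC135', 'HCC136', 'HCC137', 'HCC138'},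
--         'sepsis': {'HCC2'},
--         'substance': {'HCC54', 'HCC55', 'HCC56'},
--         'psych': {'HCC57', 'HCC58', 'HCC59', 'HCC60'},
--         'hcc47': {'HCC47'},
--         'hcc85': {'HCC85'},
--         'hcc96': {'HCC96'},
--     }
--     table = [
--         ('HCC47_gCancer', ['cancer', 'hcc47']),
--         ('DIABETES_CHF', ['diabetes', 'chf']),
--         ('CHF_gCopdCF', ['chf', 'g_copd_cf']),
--         ('HCC85_gRenal_V24', ['hcc85', 'renal_v24']),
--         ('gCopdCF_CARD_RESP_FAIL', ['g_copd_cf', 'card_resp_fail']),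
--         ('HCC85_HCC96', ['hcc85', 'hcc96']),
--         ('gSubstanceUseDisorder_gPsych', ['substance', 'psych']),
--     ]
--     return [name for name, reqs in table if all(groups[r] & present for r in reqs)]
-- ===== Notes on version B (the rewrite author's own statement) =====
-- stated objective: faster
-- what changed: Replaces A's twelve unrolled list-membership loops and hand-built boolean dict with one set of present categories plus a data-driven table of (interaction, required groups) evaluated in a single comprehension.
import Mathlib
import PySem

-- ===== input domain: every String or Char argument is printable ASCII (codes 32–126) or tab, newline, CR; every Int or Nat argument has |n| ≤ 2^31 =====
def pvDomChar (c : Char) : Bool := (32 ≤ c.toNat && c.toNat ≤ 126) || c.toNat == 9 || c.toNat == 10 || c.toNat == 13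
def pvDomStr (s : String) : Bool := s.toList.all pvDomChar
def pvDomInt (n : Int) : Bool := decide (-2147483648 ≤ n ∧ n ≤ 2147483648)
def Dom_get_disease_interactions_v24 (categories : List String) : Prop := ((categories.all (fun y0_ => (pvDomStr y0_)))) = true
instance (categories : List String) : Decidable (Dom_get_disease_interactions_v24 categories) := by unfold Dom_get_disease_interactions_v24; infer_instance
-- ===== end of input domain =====

-- B replaces A's twelve unrolled membership loops and hand-built boolean dict with one
-- set of present categories and a data-driven (interaction, required-groups) table
-- evaluated in a single comprehension (one set build replaces repeated list scans).

-- ===== PORT A =====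
-- 'for category in lst: if category in categories: flag = True; break'
def pvFlagLoop (lst : List String) (cats : List String) : Bool :=
  match lst with
  | [] => false
  | c :: rest => if cats.contains c then true else pvFlagLoop rest cats

def get_disease_interactions_v24 (categories : List String) : List String :=
  let cancer := pvFlagLoop ["HCC8", "HCC9", "HCC10", "HCC11", "HCC12"] categories
  let diabetes := pvFlagLoop ["HCC17", "HCC18", "HCC19"] categories
  let card_resp_fail := pvFlagLoop ["HCC82", "HCC83", "HCC84"] categories
  let chf := pvFlagLoop ["HCC85"] categories
  let g_copd_cf := pvFlagLoop ["HCC110", "HCC111", "HCC112"] categories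
  let renal_v24 := pvFlagLoop ["HCC134", "HCC135", "HCC136", "HCC137", "HCC138"] categories
  let _sepsis := pvFlagLoop ["HCC2"] categories
  let g_substance_use_disorder_v24 := pvFlagLoop ["HCC54", "HCC55", "HCC56"] categories
  let g_pyshiatric_v24 := pvFlagLoop ["HCC57", "HCC58", "HCC59", "HCC60"] categories
  let hcc47 := categories.contains "HCC47"
  let hcc85 := categories.contains "HCC85"
  let hcc96 := categories.contains "HCC96"
  -- the dict literal (distinct keys, insertion order) as an association list
  let interactions : List (String × Bool) :=
    [("HCC47_gCancer", cancer && hcc47),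
     ("DIABETES_CHF", diabetes && chf),
     ("CHF_gCopdCF", chf && g_copd_cf),
     ("HCC85_gRenal_V24", hcc85 && renal_v24),
     ("gCopdCF_CARD_RESP_FAIL", g_copd_cf && card_resp_fail),
     ("HCC85_HCC96", hcc85 && hcc96),
     ("gSubstanceUseDisorder_gPsych", g_pyshiatric_v24 && g_substance_use_disorder_v24)]
  (interactions.filter (fun kv => kv.2)).map (fun kv => kv.1)

-- ===== PORT B =====
def pvGroups : PySem.Dict String (PySem.Set String) :=
  PySem.Dict.ofList
    [("cancer", PySem.Set.ofList ["HCC8", "HCC9", "HCC10", "HCC11", "HCC12"]),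
     ("diabetes", PySem.Set.ofList ["HCC17", "HCC18", "HCC19"]),
     ("card_resp_fail", PySem.Set.ofList ["HCC82", "HCC83", "HCC84"]),
     ("chf", PySem.Set.ofList ["HCC85"]),
     ("g_copd_cf", PySem.Set.ofList ["HCC110", "HCC111", "HCC112"]),
     ("renal_v24", PySem.Set.ofList ["HCC134", "HCC135", "HCC136", "HCC137", "HCC138"]),
     ("sepsis", PySem.Set.ofList ["HCC2"]),
     ("substance", PySem.Set.ofList ["HCC54", "HCC55", "HCC56"]),
     ("psych", PySem.Set.ofList ["HCC57", "HCC58", "HCC59", "HCC60"]),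
     ("hcc47", PySem.Set.ofList ["HCC47"]),
     ("hcc85", PySem.Set.ofList ["HCC85"]),
     ("hcc96", PySem.Set.ofList ["HCC96"])]

def pvTable : List (String × List String) :=
  [("HCC47_gCancer", ["cancer", "hcc47"]),
   ("DIABETES_CHF", ["diabetes", "chf"]),
   ("CHF_gCopdCF", ["chf", "g_copd_cf"]),
   ("HCC85_gRenal_V24", ["hcc85", "renal_v24"]),
   ("gCopdCF_CARD_RESP_FAIL", ["g_copd_cf", "card_resp_fail"]),
   ("HCC85_HCC96", ["hcc85", "hcc96"]),
   ("gSubstanceUseDisorder_gPsych", ["substance", "psych"])]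

def get_disease_interactions_v24_alt (categories : List String) : List String :=
  let present := PySem.Set.ofList categories
  (pvTable.filter (fun nr =>
      nr.2.all (fun r =>
        !(PySem.Set.inter (pvGroups.getD r PySem.Set.empty) present).isEmpty))).map
    (fun nr => nr.1)

-- ===== PRECONDITION & SPEC =====
def Spec_get_disease_interactions_v24 (categories : List String) (out : List String) : Prop := out = get_disease_interactions_v24_alt categories
instance (categories : List String) (out : List String) : Decidable (Spec_get_disease_interactions_v24 categories out) := by unfold Spec_get_disease_interactions_v24; infer_instance

-- ===== CLAIM (what is proved, stated in full; the proofs are below) =====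
def Claim_equal_get_disease_interactions_v24 : Prop := ∀ (categories : List String), Dom_get_disease_interactions_v24 categories → Spec_get_disease_interactions_v24 categories (get_disease_interactions_v24 categories)

-- ===== LEMMAS AND PROOFS =====
lemma pvFlagLoop_eq_true_iff (lst cats : List String) :
    pvFlagLoop lst cats = true ↔ ∃ c ∈ lst, c ∈ cats := by
  induction lst with
  | nil => simp [pvFlagLoop]
  | cons c rest ih =>
      by_cases h : c ∈ cats
      · simp [pvFlagLoop, h]
      · simp [pvFlagLoop, h, ih]

lemma pvInterFlag (l cats : List String) :
    (!(PySem.Set.inter (PySem.Set.ofList l) (PySem.Set.ofList cats)).isEmpty)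
      = pvFlagLoop l cats := by
  rw [Bool.eq_iff_iff, Bool.not_eq_true', List.isEmpty_eq_false_iff_exists_mem,
    pvFlagLoop_eq_true_iff]
  simp [PySem.Set.mem_inter, PySem.Set.mem_ofList]

lemma pvFlag_singleton (s : String) (cats : List String) :
    pvFlagLoop [s] cats = cats.contains s := by
  simp [pvFlagLoop]

-- filtering a table by a condition on the second component equals filtering the
-- (name, bool) pair list obtained by mapping that condition
lemma pvFilterAll {α : Type} (l : List (String × α)) (q : String × α → Bool) :
    (l.filter q).map (fun nr => nr.1)
      = ((l.map (fun nr => (nr.1, q nr))).filter (fun kv => kv.2)).map (fun kv => kv.1) := by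
  induction l with
  | nil => rfl
  | cons x rest ih =>
      by_cases h : q x = true
      · simp [h, ih]
      · simp [h, ih]

-- ===== VERDICT (by name: the statement is the Claim_ definition above) =====
theorem get_disease_interactions_v24_spec : Claim_equal_get_disease_interactions_v24 := by
  intro categories _
  unfold Spec_get_disease_interactions_v24
  unfold get_disease_interactions_v24 get_disease_interactions_v24_alt
  conv_rhs => rw [pvFilterAll]
  simp only [pvTable, List.map, List.all_cons, List.all_nil, Bool.and_true,
    show pvGroups.getD "cancer" PySem.Set.empty = PySem.Set.ofList ["HCC8", "HCC9", "HCC10", "HCC11", "HCC12"] from by decide,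
    show pvGroups.getD "diabetes" PySem.Set.empty = PySem.Set.ofList ["HCC17", "HCC18", "HCC19"] from by decide,
    show pvGroups.getD "card_resp_fail" PySem.Set.empty = PySem.Set.ofList ["HCC82", "HCC83", "HCC84"] from by decide,
    show pvGroups.getD "chf" PySem.Set.empty = PySem.Set.ofList ["HCC85"] from by decide,
    show pvGroups.getD "g_copd_cf" PySem.Set.empty = PySem.Set.ofList ["HCC110", "HCC111", "HCC112"] from by decide,
    show pvGroups.getD "renal_v24" PySem.Set.empty = PySem.Set.ofList ["HCC134", "HCC135", "HCC136", "HCC137", "HCC138"] from by decide,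
    show pvGroups.getD "substance" PySem.Set.empty = PySem.Set.ofList ["HCC54", "HCC55", "HCC56"] from by decide,
    show pvGroups.getD "psych" PySem.Set.empty = PySem.Set.ofList ["HCC57", "HCC58", "HCC59", "HCC60"] from by decide,
    show pvGroups.getD "hcc47" PySem.Set.empty = PySem.Set.ofList ["HCC47"] from by decide,
    show pvGroups.getD "hcc85" PySem.Set.empty = PySem.Set.ofList ["HCC85"] from by decide,
    show pvGroups.getD "hcc96" PySem.Set.empty = PySem.Set.ofList ["HCC96"] from by decide,
    pvInterFlag, pvFlag_singleton]
  congr 1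
  congr 1
  simp [Bool.and_comm]
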